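-- pv_equiv track=rewrite | github.com/samsungapore/Another-SDSE | script_analyser.py | length_is_okay
-- ===== SOURCE A (Python) =====
-- def count_rem(w_line, i):
--     if w_line.find('>') != -1:
--         count = 1
--     else:
--         count = 0
--     while i < len(w_line) and w_line[i] != '>':
--         count += 1
--         i += 1
--     return count, i + 1
--
-- def cleaned_text(w_line):
--     i = 0
--     new_line = list()
--     while i < len(w_line):
--         while i < len(w_line) and w_line[i] == '<':
--             var, i = count_rem(w_line, i)
--         if i < len(w_line) and w_line[i] != '<':
--             new_line.append(w_line[i])
--         i += 1
--     return ''.join(new_line)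
--
-- def length_is_okay(line):
--     line = cleaned_text(line)
--     if line.find('\n') == -1:
--         if len(line.replace('\r', '')) > 64:
--             return False
--         else:
--             return True
--     else:
--         tab = line.split('\n')
--         for single_line in tab:
--             if len(single_line.replace('\r', '')) > 64:
--                 return False
--         return True
-- ===== SOURCE B (Python) =====
-- def length_is_okay(line):
--     # Staged, loop-free pipeline: split on '<'; the text before the first '<' is kept;
--     # each later chunk keeps only what follows its first '>' (str.partition), so a
--     # chunk with no '>' (an unmatched '<') is dropped entirely.  Then strip '\r'
--     # once from the whole cleaned text and bound the longest newline-separated line.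
--     first, *rest = line.split('<')
--     pieces = [first]
--     for chunk in rest:
--         _, sep, after = chunk.partition('>')
--         if sep:
--             pieces.append(after)
--     cleaned = ''.join(pieces).replace('\r', '')
--     return max(len(s) for s in cleaned.split('\n')) <= 64
-- ===== Notes on version B (the rewrite author's own statement) =====
-- stated objective: faster
-- what changed: Replaces A's stateful index-walking loops (helper count_rem, which rescans the whole string with find on every tag character, plus nested whiles and a two-branch length check) by a loop-free staged pipeline: split('<'), keep the part after the first '>' of each chunk via str.partition, join, strip '\r' once globally, and bound the maximum newline-separated line length.
import Mathlib
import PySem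

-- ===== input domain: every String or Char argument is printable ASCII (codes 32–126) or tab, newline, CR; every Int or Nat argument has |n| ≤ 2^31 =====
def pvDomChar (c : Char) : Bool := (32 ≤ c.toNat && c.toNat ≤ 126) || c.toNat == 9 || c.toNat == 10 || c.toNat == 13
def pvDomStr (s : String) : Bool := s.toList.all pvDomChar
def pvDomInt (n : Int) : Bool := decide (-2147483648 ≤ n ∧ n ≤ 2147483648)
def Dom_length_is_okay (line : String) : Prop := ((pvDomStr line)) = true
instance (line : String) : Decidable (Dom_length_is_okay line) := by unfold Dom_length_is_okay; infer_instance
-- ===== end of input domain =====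

-- B replaces A's stateful index-walking loops (whose helper rescans the string with find
-- on every tag character) by a staged split/partition/join/replace/split pipeline with a
-- max-length bound; measured faster in a timing run; return value only.

-- ===== PORT A =====
-- 'while i < len(w_line) and w_line[i] != '>': count += 1; i += 1' then 'return count, i + 1'.
-- fuel is a totality device only: callers pass w.length + 1, which the loop (i strictly increases,
-- stops at w.length) never exhausts.
def countRemLoop (w : List Char) (fuel count i : Nat) : Nat × Nat :=
  match fuel with
  | 0 => (count, i + 1)
  | fuel + 1 =>
    if h : i < w.length then
      if w[i] ≠ '>' then countRemLoop w fuel (count + 1) (i + 1) else (count, i + 1)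
    else (count, i + 1)

def countRem (w : List Char) (i : Nat) : Nat × Nat :=
  let count : Nat := if PySem.Chars.find w ['>'] ≠ -1 then 1 else 0
  countRemLoop w (w.length + 1) count i

-- inner 'while i < len(w_line) and w_line[i] == '<'' loop of cleaned_text (fuel as above)
def innerLoop (w : List Char) (fuel i : Nat) : Nat :=
  match fuel with
  | 0 => i
  | fuel + 1 =>
    if h : i < w.length then
      if w[i] = '<' then innerLoop w fuel (countRem w i).2 else i
    else i

-- outer 'while i < len(w_line)' loop of cleaned_text; appended characters accumulate in acc
def cleanedLoop (w : List Char) (fuel i : Nat) (acc : List Char) : List Char :=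
  match fuel with
  | 0 => acc
  | fuel + 1 =>
    if h : i < w.length then
      let j := innerLoop w (w.length + 1) i
      let acc' := if h2 : j < w.length then (if w[j] ≠ '<' then acc ++ [w[j]] else acc) else acc
      cleanedLoop w fuel (j + 1) acc'
    else acc

def cleanedText (w : List Char) : List Char := cleanedLoop w (w.length + 1) 0 []

-- 'for single_line in tab: if len(single_line.replace('\r', '')) > 64: return False; return True'
def checkLines (tab : List (List Char)) : Bool :=
  match tab with
  | [] => true
  | l :: rest =>
      if (PySem.Chars.replace l ['\r'] []).length > 64 then false else checkLines rest

def length_is_okay (line : String) : Bool :=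
  let l := cleanedText line.toList
  if PySem.Chars.find l ['\n'] = -1 then
    if (PySem.Chars.replace l ['\r'] []).length > 64 then false else true
  else
    checkLines (PySem.Chars.splitOn l ['\n'])

-- ===== PORT B =====
def length_is_okay_alt (line : String) : Bool :=
  -- 'first, *rest = line.split('<')' (split never yields an empty list, so headD is exact)
  let parts := PySem.Chars.splitOn line.toList ['<']
  let first := parts.headD []
  let rest := parts.tail
  -- the for-loop appending; str.partition('>') hand-ported for its single-character
  -- separator: 'sep' nonempty iff '>' occurs, 'after' = text after the first '>' (exact)
  let pieces := rest.foldl (fun acc chunk =>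
      if PySem.Chars.isIn ['>'] chunk then
        acc ++ [(chunk.dropWhile (fun c => c != '>')).drop 1]
      else acc) [first]
  let cleaned := PySem.Chars.replace (PySem.Chars.join [] pieces) ['\r'] []
  -- max(len(s) for s in cleaned.split('\n')) <= 64; 'none' is unreachable (split is nonempty)
  match PySem.List.max? ((PySem.Chars.splitOn cleaned ['\n']).map (fun s => (s.length : Int))) (fun x => x) with
  | some m => decide (m ≤ 64)
  | none => true

-- ===== PRECONDITION & SPEC =====
def Spec_length_is_okay (line : String) (out : Bool) : Prop := out = length_is_okay_alt line
instance (line : String) (out : Bool) : Decidable (Spec_length_is_okay line out) := by unfold Spec_length_is_okay; infer_instance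

-- ===== CLAIM =====
def Claim_equal_length_is_okay : Prop := ∀ (line : String), Dom_length_is_okay line → Spec_length_is_okay line (length_is_okay line)

-- ===== LEMMAS AND PROOFS =====

-- proof-side intermediary: the one-pass tag stripper both programs compute
def stripTags (cs : List Char) (inTag : Bool) : List Char :=
  match cs, inTag with
  | [], _ => []
  | c :: rest, false => if c = '<' then stripTags rest true else c :: stripTags rest false
  | c :: rest, true => if c = '>' then stripTags rest false else stripTags rest true

-- pure single-character split (what splitOn.go computes for a one-char separator)
def sp (c0 : Char) : List Char → List (List Char)
  | [] => [[]]
  | c :: rest => if c = c0 then [] :: sp c0 rest else (sp c0 rest).modifyHead (c :: ·)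

-- the contribution of one '<'-chunk to the cleaned text
def gpart (p : List Char) : List Char :=
  if PySem.Chars.isIn ['>'] p then (p.dropWhile (fun c => c != '>')).drop 1 else []

theorem sp_ne_nil (c0 : Char) (l : List Char) : sp c0 l ≠ [] := by
  cases l with
  | nil => simp [sp]
  | cons c rest =>
      by_cases h : c = c0 <;> simp [sp, h]
      exact sp_ne_nil c0 rest

theorem splitOn_go_eq_sp (c0 : Char) (fuel : Nat) (l cur : List Char) (acc : List (List Char))
    (hf : l.length < fuel) :
    PySem.Chars.splitOn.go [c0] fuel l cur acc
      = acc.reverse ++ (sp c0 l).modifyHead (cur.reverse ++ ·) := by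
  induction fuel generalizing l cur acc with
  | zero => omega
  | succ fuel ih =>
      cases l with
      | nil => rw [PySem.Chars.splitOn.go]; simp [sp]; omega
      | cons c rest =>
          rw [PySem.Chars.splitOn.go]
          by_cases h : c = c0
          · have hpre : List.isPrefixOf [c0] (c :: rest) = true := by
              simp [List.isPrefixOf, h]
            simp only [hpre, if_true]
            have hd : List.drop [c0].length (c :: rest) = rest := rfl
            rw [hd, ih rest [] (cur.reverse :: acc) (by simp at hf ⊢; omega)]
            simp [sp, h]
            cases sp c0 rest <;> simp [List.modifyHead]
          · have hpre : List.isPrefixOf [c0] (c :: rest) = false := by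
              simp [List.isPrefixOf]; exact fun hh => absurd hh.symm h
            simp only [hpre, Bool.false_eq_true, if_false]
            rw [ih rest (c :: cur) acc (by simp at hf ⊢; omega)]
            obtain ⟨h0, t0, ht⟩ := List.exists_cons_of_ne_nil (sp_ne_nil c0 rest)
            simp [sp, h, ht]
  
theorem splitOn_eq_sp (c0 : Char) (l : List Char) :
    PySem.Chars.splitOn l [c0] = sp c0 l := by
  rw [PySem.Chars.splitOn, splitOn_go_eq_sp c0 _ l [] [] (by omega)]
  obtain ⟨h0, t0, ht⟩ := List.exists_cons_of_ne_nil (sp_ne_nil c0 l)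
  simp [ht]

theorem replace_go_filter (fuel : Nat) (l acc : List Char) (hf : l.length ≤ fuel) :
    PySem.Chars.replace.go ['\r'] [] fuel l acc
      = acc.reverse ++ l.filter (fun c => c != '\r') := by
  induction fuel generalizing l acc with
  | zero =>
      have : l = [] := List.eq_nil_of_length_eq_zero (by omega)
      subst this; rw [PySem.Chars.replace.go]; simp
  | succ fuel ih =>
      cases l with
      | nil => rw [PySem.Chars.replace.go]; simp; omega
      | cons c rest =>
          rw [PySem.Chars.replace.go]
          by_cases h : c = '\r'
          · have hpre : List.isPrefixOf ['\r'] (c :: rest) = true := by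
              simp [List.isPrefixOf, h]
            simp only [hpre, if_true]
            have hd : List.drop ['\r'].length (c :: rest) = rest := rfl
            rw [hd, show (([] : List Char)).reverse ++ acc = acc from by simp,
              ih rest acc (by simp at hf ⊢; omega)]
            simp [h]
          · have hpre : List.isPrefixOf ['\r'] (c :: rest) = false := by
              simp [List.isPrefixOf]; exact fun hh => absurd hh.symm h
            simp only [hpre, Bool.false_eq_true, if_false]
            rw [ih rest (c :: acc) (by simp at hf ⊢; omega)]
            simp [h]

theorem replace_cr_eq_filter (l : List Char) :
    PySem.Chars.replace l ['\r'] [] = l.filter (fun c => c != '\r') := by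
  rw [PySem.Chars.replace]
  simp only [List.isEmpty_cons, Bool.false_eq_true, if_false]
  exact replace_go_filter l.length l [] le_rfl

theorem isIn_single_iff (c : Char) (l : List Char) :
    PySem.Chars.isIn [c] l = true ↔ c ∈ l := by
  rw [PySem.Chars.isIn_iff_infix]
  constructor
  · intro hh; exact hh.subset (by simp)
  · intro hh
    obtain ⟨s, t, rfl⟩ := List.append_of_mem hh
    exact ⟨s, t, by simp⟩

-- one pass = split('<') then keep what follows each chunk's first '>'
theorem stripTags_eq_sp (w : List Char) :
    (stripTags w false
        = (sp '<' w).headD [] ++ ((sp '<' w).tail.map gpart).flatten)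
    ∧ (stripTags w true = ((sp '<' w).map gpart).flatten) := by
  induction w with
  | nil =>
      constructor
      · simp [stripTags, sp]
      · simp [stripTags, sp, gpart, PySem.Chars.isIn]
  | cons c rest ih =>
      obtain ⟨h0, t0, ht⟩ := List.exists_cons_of_ne_nil (sp_ne_nil '<' rest)
      constructor
      · by_cases h : c = '<'
        · simp only [stripTags, h, if_true, sp]
          simpa using ih.2
        · simp only [stripTags, h, if_false, sp, ht]
          simp only [List.modifyHead, List.headD, List.tail]
          rw [ih.1, ht]
          simp
      · by_cases h : c = '<'
        · subst h
          have e1 : stripTags ('<' :: rest) true = stripTags rest true := by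
            simp [stripTags]
          have e2 : sp '<' ('<' :: rest) = [] :: sp '<' rest := by simp [sp]
          have e3 : gpart [] = [] := by simp [gpart, PySem.Chars.isIn]
          rw [e1, e2, ih.2]
          simp [e3]
        · simp only [sp, if_neg h, ht, List.modifyHead]
          by_cases hgt : c = '>'
          · simp only [stripTags, hgt]
            rw [ih.1, ht]
            have : gpart ('>' :: h0) = h0 := by
              simp [gpart, isIn_single_iff, List.dropWhile]
            simp [this]
          · simp only [stripTags, hgt, if_false]
            rw [ih.2, ht]
            have : gpart (c :: h0) = gpart h0 := by
              by_cases hm : '>' ∈ h0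
              · have hb : (c != '>') = true := by simpa using hgt
                simp [gpart, isIn_single_iff, hm, List.dropWhile, hb]
              · have h1 : PySem.Chars.isIn ['>'] (c :: h0) = false := by
                  rw [Bool.eq_false_iff]
                  intro hh
                  have h2 := (isIn_single_iff _ _).1 hh
                  simp only [List.mem_cons] at h2
                  rcases h2 with h2 | h2
                  · exact hgt h2.symm
                  · exact hm h2
                have h2 : PySem.Chars.isIn ['>'] h0 = false := by
                  rw [Bool.eq_false_iff]
                  exact fun hh => hm ((isIn_single_iff _ _).1 hh)
                simp [gpart, h1, h2]
            simp [this]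

-- the '\r'-filter commutes with splitting on '\n'
theorem sp_filter_comm (l : List Char) :
    sp '\n' (l.filter (fun c => c != '\r'))
      = (sp '\n' l).map (fun s => s.filter (fun c => c != '\r')) := by
  induction l with
  | nil => simp [sp]
  | cons c rest ih =>
      obtain ⟨h0, t0, ht⟩ := List.exists_cons_of_ne_nil (sp_ne_nil '\n' rest)
      by_cases h : c = '\n'
      · subst h
        simp only [List.filter, show (('\n' : Char) != '\r') = true from by decide]
        simp [sp, ih]
      · by_cases hr : c = '\r'
        · subst hr
          simp only [List.filter, show (('\r' : Char) != '\r') = false from by decide]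
          rw [ih, ht]
          simp [sp, show ¬('\r' : Char) = '\n' from by decide, ht, List.filter]
        · have hcr : (c != '\r') = true := by simpa using hr
          simp only [List.filter, hcr]
          rw [show sp '\n' (c :: rest.filter (fun c => c != '\r'))
                = (sp '\n' (rest.filter (fun c => c != '\r'))).modifyHead (c :: ·) from by
              simp [sp, h]]
          rw [ih, ht]
          simp [sp, h, ht, List.filter, hcr]

-- max(...) <= 64 over Ints is the same test as 'all <= 64'
theorem max?_le_iff_all (xs : List Int) :
    (match PySem.List.max? xs (fun x => x) with
      | some m => decide (m ≤ 64)
      | none => true)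
      = xs.all (fun x => decide (x ≤ 64)) := by
  cases hm : PySem.List.max? xs (fun x => x) with
  | none =>
      rw [(PySem.List.max?_eq_none_iff xs _).1 hm]
      simp
  | some m =>
      simp only []
      by_cases h : m ≤ 64
      · rw [decide_eq_true h]
        symm
        rw [List.all_eq_true]
        intro x hx
        have := PySem.List.max?_isMax hm x hx
        simp only [decide_eq_true_eq]
        omega
      · rw [decide_eq_false h]
        symm
        rw [Bool.eq_false_iff]
        intro hall
        rw [List.all_eq_true] at hall
        have := hall m (PySem.List.max?_mem hm)
        simp only [decide_eq_true_eq] at this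
        omega

theorem join_nil_eq_flatten (ps : List (List Char)) :
    PySem.Chars.join [] ps = ps.flatten := by
  induction ps with
  | nil => simp [PySem.Chars.join, List.intercalate]
  | cons p rest ih =>
      cases rest with
      | nil => simp [PySem.Chars.join, List.intercalate]
      | cons q rest' =>
          simp only [PySem.Chars.join, List.intercalate] at ih ⊢
          simp [List.intersperse] at ih ⊢
          exact ih

-- ===== A-side lemmas (characterising cleaned_text as the one-pass stripper) =====

theorem countRemLoop_snd_ge (w : List Char) (fuel count i : Nat) :
    i + 1 ≤ (countRemLoop w fuel count i).2 := by
  induction fuel generalizing count i with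
  | zero => simp [countRemLoop]
  | succ fuel ih =>
      rw [countRemLoop]
      by_cases h : i < w.length
      · by_cases hne : w[i] ≠ '>'
        · rw [dif_pos h, if_pos hne]
          have := ih (count + 1) (i + 1); omega
        · simp [h, hne]
      · simp [h]

theorem stripTags_countRem (w : List Char) (fuel count i : Nat) (hf : w.length - i < fuel) :
    stripTags (w.drop i) true = stripTags (w.drop (countRemLoop w fuel count i).2) false := by
  induction fuel generalizing count i with
  | zero => omega
  | succ fuel ih =>
      rw [countRemLoop]
      by_cases h : i < w.length
      · by_cases hne : w[i] ≠ '>'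
        · rw [dif_pos h, if_pos hne]
          rw [List.drop_eq_getElem_cons h]
          simp only [stripTags, if_neg hne]
          exact ih (count + 1) (i + 1) (by omega)
        · rw [dif_pos h, if_neg hne]
          rw [not_not] at hne
          rw [List.drop_eq_getElem_cons h]
          simp [stripTags, hne]
      · rw [dif_neg h]
        have h1 : w.drop i = [] := List.drop_eq_nil_of_le (by omega)
        have h2 : w.drop (i + 1) = [] := List.drop_eq_nil_of_le (by omega)
        simp [h1, h2, stripTags]

theorem innerLoop_ge (w : List Char) (fuel i : Nat) : i ≤ innerLoop w fuel i := by
  induction fuel generalizing i with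
  | zero => simp [innerLoop]
  | succ fuel ih =>
      rw [innerLoop]
      by_cases h : i < w.length
      · by_cases heq : w[i] = '<'
        · rw [dif_pos h, if_pos heq]
          have h1 := ih (countRem w i).2
          have h2 := countRemLoop_snd_ge w (w.length + 1) (if PySem.Chars.find w ['>'] ≠ -1 then 1 else 0) i
          simp only [countRem] at h1 ⊢
          omega
        · simp [h, heq]
      · simp [h]

theorem stripTags_innerLoop (w : List Char) (fuel i : Nat) (hf : w.length - i < fuel) :
    stripTags (w.drop (innerLoop w fuel i)) false = stripTags (w.drop i) false := by
  induction fuel generalizing i with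
  | zero => omega
  | succ fuel ih =>
      rw [innerLoop]
      by_cases h : i < w.length
      · by_cases heq : w[i] = '<'
        · rw [dif_pos h, if_pos heq]
          have hsnd := countRemLoop_snd_ge w (w.length + 1) (if PySem.Chars.find w ['>'] ≠ -1 then 1 else 0) i
          rw [ih (countRem w i).2 (by simp only [countRem]; omega)]
          have h1 : stripTags (w.drop i) true = stripTags (w.drop i) false := by
            rw [List.drop_eq_getElem_cons h]
            simp [stripTags, heq]
          rw [countRem, ← stripTags_countRem w (w.length + 1) _ i (by omega), h1]
        · simp [h, heq]
      · simp [h]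

theorem innerLoop_exit (w : List Char) (fuel i : Nat) (hf : w.length - i < fuel) :
    innerLoop w fuel i < w.length → w.getD (innerLoop w fuel i) ' ' ≠ '<' := by
  induction fuel generalizing i with
  | zero => omega
  | succ fuel ih =>
      rw [innerLoop]
      by_cases h : i < w.length
      · by_cases heq : w[i] = '<'
        · rw [dif_pos h, if_pos heq]
          have hsnd := countRemLoop_snd_ge w (w.length + 1) (if PySem.Chars.find w ['>'] ≠ -1 then 1 else 0) i
          exact ih (countRem w i).2 (by simp only [countRem]; omega)
        · rw [dif_pos h, if_neg heq]
          intro _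
          rw [List.getD_eq_getElem w ' ' h]
          exact heq
      · rw [dif_neg h]
        intro hlt
        exact absurd hlt h

theorem cleanedLoop_eq (w : List Char) (fuel i : Nat) (acc : List Char) (hf : w.length - i < fuel) :
    cleanedLoop w fuel i acc = acc ++ stripTags (w.drop i) false := by
  induction fuel generalizing i acc with
  | zero => omega
  | succ fuel ih =>
      rw [cleanedLoop]
      by_cases h : i < w.length
      · simp only [h, dif_pos]
        have hge := innerLoop_ge w (w.length + 1) i
        rw [← stripTags_innerLoop w (w.length + 1) i (by omega)]
        by_cases hj : innerLoop w (w.length + 1) i < w.length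
        · have hne : w[innerLoop w (w.length + 1) i] ≠ '<' := by
            have := innerLoop_exit w (w.length + 1) i (by omega) hj
            rwa [List.getD_eq_getElem w ' ' hj] at this
          simp only [hj, hne, dif_pos, ne_eq, not_false_eq_true, if_true]
          rw [ih _ _ (by omega)]
          rw [List.drop_eq_getElem_cons hj]
          simp [stripTags, hne]
        · have h1 : w.drop (innerLoop w (w.length + 1) i) = [] := List.drop_eq_nil_of_le (by omega)
          have h2 : w.drop (innerLoop w (w.length + 1) i + 1) = [] := List.drop_eq_nil_of_le (by omega)
          simp only [hj, dif_neg, not_false_eq_true]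
          rw [ih _ _ (by omega)]
          simp [h1, h2, stripTags]
      · have h1 : w.drop i = [] := List.drop_eq_nil_of_le (by omega)
        simp [h, h1, stripTags]

theorem cleanedText_eq (w : List Char) : cleanedText w = stripTags w false := by
  rw [cleanedText, cleanedLoop_eq w _ _ _ (by omega)]
  simp

theorem sp_no_nl (l : List Char) (h : '\n' ∉ l) : sp '\n' l = [l] := by
  induction l with
  | nil => simp [sp]
  | cons c rest ih =>
      have hc : ¬ c = '\n' := fun hh => h (by simp [hh])
      simp [sp, hc, ih (fun hh => h (List.mem_cons_of_mem _ hh))]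

theorem checkLines_eq_all (tab : List (List Char)) :
    checkLines tab = tab.all (fun s => (PySem.Chars.replace s ['\r'] []).length ≤ 64) := by
  induction tab with
  | nil => rfl
  | cons l rest ih =>
      by_cases hc : (PySem.Chars.replace l ['\r'] []).length > 64
      · simp [checkLines, hc, Nat.not_le_of_lt hc]
      · simp [checkLines, hc, Nat.le_of_not_lt hc, ih]

theorem infix_nl_iff (l : List Char) : ['\n'] <:+: l ↔ '\n' ∈ l := by
  constructor
  · intro hh; exact hh.subset (by simp)
  · intro hh
    obtain ⟨s, t, rfl⟩ := List.append_of_mem hh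
    exact ⟨s, t, by simp⟩

-- both programs reduced to: every '\n'-separated line of stripTags, with '\r' dropped, is ≤ 64
theorem A_eq_canon (line : String) :
    length_is_okay line
      = (sp '\n' (stripTags line.toList false)).all
          (fun s => decide ((s.filter (fun c => c != '\r')).length ≤ 64)) := by
  unfold length_is_okay
  simp only [cleanedText_eq]
  set l := stripTags line.toList false with hl
  by_cases hf : PySem.Chars.find l ['\n'] = -1
  · have hmem : '\n' ∉ l := by
      rw [PySem.Chars.find_eq_neg_one_iff] at hf
      exact fun hm => hf ((infix_nl_iff l).2 hm)
    simp only [hf, if_pos, sp_no_nl l hmem, List.all_cons, List.all_nil, Bool.and_true,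
      replace_cr_eq_filter]
    by_cases hc : (l.filter (fun c => c != '\r')).length > 64
    · simp only [if_pos hc]
      symm; rw [decide_eq_false_iff_not]; omega
    · simp only [if_neg hc]
      symm; rw [decide_eq_true_eq]; omega
  · simp only [hf, if_false, splitOn_eq_sp, checkLines_eq_all, replace_cr_eq_filter]

theorem gpart_flatten (t0 : List (List Char)) :
    (List.map (fun chunk => List.drop 1 (List.dropWhile (fun c => c != '>') chunk))
        (t0.filter (fun chunk => PySem.Chars.isIn ['>'] chunk))).flatten
      = (t0.map gpart).flatten := by
  induction t0 with
  | nil => simp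
  | cons p rest ihp =>
      simp only [List.drop_one] at ihp
      by_cases hp : PySem.Chars.isIn ['>'] p
      · simp [hp, gpart, ihp]
      · simp [hp, gpart, ihp]

theorem B_eq_canon (line : String) :
    length_is_okay_alt line
      = (sp '\n' (stripTags line.toList false)).all
          (fun s => decide ((s.filter (fun c => c != '\r')).length ≤ 64)) := by
  unfold length_is_okay_alt
  simp only [splitOn_eq_sp, PySem.List.foldl_append_if
    (fun chunk => PySem.Chars.isIn ['>'] chunk)
    (fun chunk => (chunk.dropWhile (fun c => c != '>')).drop 1)]
  set w := line.toList with hw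
  obtain ⟨h0, t0, ht⟩ := List.exists_cons_of_ne_nil (sp_ne_nil '<' w)
  rw [max?_le_iff_all, ht]
  have hjoin : PySem.Chars.join []
      ([h0] ++ (t0.filter (fun chunk => PySem.Chars.isIn ['>'] chunk)).map
        (fun chunk => (chunk.dropWhile (fun c => c != '>')).drop 1))
      = h0 ++ (t0.map gpart).flatten := by
    rw [join_nil_eq_flatten]
    simp only [List.flatten_append, List.flatten_cons, List.flatten_nil, List.append_nil]
    congr 1
    exact gpart_flatten t0
  simp only [List.headD, List.tail]
  rw [hjoin]
  have hstrip : stripTags w false = h0 ++ (t0.map gpart).flatten := by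
    rw [(stripTags_eq_sp w).1, ht]; simp
  rw [← hstrip, replace_cr_eq_filter, sp_filter_comm]
  simp only [List.all_map]
  refine congrArg (List.all _) (funext fun s => ?_)
  simp

-- ===== VERDICT =====
theorem length_is_okay_spec : Claim_equal_length_is_okay := by
  intro line _
  unfold Spec_length_is_okay
  rw [A_eq_canon, B_eq_canon]
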